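-- pv_equiv track=rewrite | github.com/ericzhang98/competitive | codejam/2022/round1b/b.py | solution
-- ===== SOURCE A (Python) =====
-- import functools
--
-- def solution(products):
--     N, P = len(products), len(products[0])
--     for line in products:
--         line.sort()
--     @functools.lru_cache(None)
--     def sub(i, j):
--         if i == 0:
--             if j == 0:
--                 return products[0][-1] + abs(products[0][-1] - products[0][0])
--             else:
--                 return products[0][-1]
--         if j == 0:
--             # previous min -> cur max -> cur min
--             cand0 = sub(i-1,0) + abs(products[i-1][0] - products[i][-1]) + abs(products[i][-1] - products[i][0])
--             # previous max -> cur max -> cur min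
--             cand1 = sub(i-1,1) + abs(products[i-1][-1] - products[i][-1]) + abs(products[i][-1] - products[i][0])
--         else:
--             # previous min -> cur min -> cur max
--             cand0 = sub(i-1,0) + abs(products[i-1][0] - products[i][0]) + abs(products[i][-1] - products[i][0])
--             # previous max -> cur min -> cur max
--             cand1 = sub(i-1,1) + abs(products[i-1][-1] - products[i][0]) + abs(products[i][-1] - products[i][0])
--         ans = min(cand0, cand1)
--         return ans
--     ans = min(sub(N-1, 0), sub(N-1,1))
--     return ans
-- ===== SOURCE B (Python) =====
-- def solution(products):
--     for line in products:
--         line.sort()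
--     pm, pM = products[0][0], products[0][-1]
--     dp0 = pM + abs(pM - pm)   # row 0 ends at its min
--     dp1 = pM                  # row 0 ends at its max
--     for row in products[1:]:
--         m, M = row[0], row[-1]
--         span = abs(M - m)
--         ndp0 = min(dp0 + abs(pm - M) + span, dp1 + abs(pM - M) + span)
--         ndp1 = min(dp0 + abs(pm - m) + span, dp1 + abs(pM - m) + span)
--         dp0, dp1, pm, pM = ndp0, ndp1, m, M
--     return min(dp0, dp1)
-- ===== Notes on version B (the rewrite author's own statement) =====
-- stated objective: simpler
-- what changed: Replaces the lru_cache-memoized top-down recursion sub(i,j) with a bottom-up single loop carrying two scalars (cost ending at current row's min / max) plus the previous row's min and max, removing the nested function, the memo table and the O(N)-deep recursion.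
import Mathlib
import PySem

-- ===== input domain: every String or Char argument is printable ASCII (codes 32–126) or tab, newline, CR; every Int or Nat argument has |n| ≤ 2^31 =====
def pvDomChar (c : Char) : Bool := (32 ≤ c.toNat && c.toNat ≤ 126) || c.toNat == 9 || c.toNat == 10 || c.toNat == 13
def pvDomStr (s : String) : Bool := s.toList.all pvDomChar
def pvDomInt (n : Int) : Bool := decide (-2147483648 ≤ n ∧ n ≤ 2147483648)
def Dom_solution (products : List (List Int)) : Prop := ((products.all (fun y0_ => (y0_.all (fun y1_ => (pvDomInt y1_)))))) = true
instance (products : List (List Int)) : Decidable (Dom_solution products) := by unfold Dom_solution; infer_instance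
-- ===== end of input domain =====

-- B replaces A's memoized top-down recursion by a bottom-up loop with two scalars;
-- both A and B sort each row of `products` IN PLACE (same side effect); the theorems are about the return value.

-- ===== PORT A =====
-- products[i][0] / products[i][-1] of the sorted rows (valid under Pre_, where Python does not raise)
def mnI (ps : List (List Int)) (i : Nat) : Int := ((ps.drop i).headD []).headD 0
def mxI (ps : List (List Int)) (i : Nat) : Int := ((ps.drop i).headD []).getLastD 0

-- the memoized recursion sub(i, j) (j ∈ {0,1}), transliterated as structural recursion on i
def subA (ps : List (List Int)) : Nat → Nat → Int
  | 0, j => if j = 0 then mxI ps 0 + |mxI ps 0 - mnI ps 0| else mxI ps 0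
  | i+1, j =>
    if j = 0 then
      min (subA ps i 0 + |mnI ps i - mxI ps (i+1)| + |mxI ps (i+1) - mnI ps (i+1)|)
          (subA ps i 1 + |mxI ps i - mxI ps (i+1)| + |mxI ps (i+1) - mnI ps (i+1)|)
    else
      min (subA ps i 0 + |mnI ps i - mnI ps (i+1)| + |mxI ps (i+1) - mnI ps (i+1)|)
          (subA ps i 1 + |mxI ps i - mnI ps (i+1)| + |mxI ps (i+1) - mnI ps (i+1)|)

def solution (products : List (List Int)) : Int :=
  let ps := products.map (fun l => PySem.List.sorted l (fun x => x) false)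
  min (subA ps (products.length - 1) 0) (subA ps (products.length - 1) 1)

-- ===== PORT B =====
-- the for-loop over products[1:] carrying (dp0, dp1, prev-min, prev-max)
def loopB (dp0 dp1 pm pM : Int) : List (List Int) → Int
  | [] => min dp0 dp1
  | row :: rest =>
      let m := row.headD 0
      let M := row.getLastD 0
      loopB (min (dp0 + |pm - M| + |M - m|) (dp1 + |pM - M| + |M - m|))
            (min (dp0 + |pm - m| + |M - m|) (dp1 + |pM - m| + |M - m|)) m M rest

def solution_alt (products : List (List Int)) : Int :=
  let ps := products.map (fun l => PySem.List.sorted l (fun x => x) false)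
  let pm := (ps.headD []).headD 0
  let pM := (ps.headD []).getLastD 0
  loopB (pM + |pM - pm|) pM pm pM (ps.drop 1)

-- ===== PRECONDITION & SPEC =====
-- Pre_ excludes exactly the inputs on which Python A raises IndexError:
-- an empty list (products[0]) or a list containing an empty row (products[i][-1]).
def Pre_solution (products : List (List Int)) : Prop :=
  products ≠ [] ∧ ∀ r ∈ products, r ≠ []
instance (products : List (List Int)) : Decidable (Pre_solution products) := by
  unfold Pre_solution; infer_instance
def pvWitness_solution : List (List Int) := [[3, 1, 2], [5]]

def Spec_solution (products : List (List Int)) (out : Int) : Prop := out = solution_alt products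
instance (products : List (List Int)) (out : Int) : Decidable (Spec_solution products out) := by unfold Spec_solution; infer_instance

-- ===== CLAIM (what is proved, stated in full; the proofs are below) =====
def Claim_equal_solution : Prop := ∀ (products : List (List Int)), Dom_solution products → Pre_solution products → Spec_solution products (solution products)

-- ===== LEMMAS AND PROOFS =====

-- invariant: after row i the loop state is (sub(i,0), sub(i,1), min_i, max_i)
lemma loopB_inv (ps : List (List Int)) (rest : List (List Int)) :
    ∀ i : Nat, ps.drop (i+1) = rest → i < ps.length →
    loopB (subA ps i 0) (subA ps i 1) (mnI ps i) (mxI ps i) rest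
      = min (subA ps (ps.length - 1) 0) (subA ps (ps.length - 1) 1) := by
  induction rest with
  | nil =>
    intro i h hi
    have hlen : ps.length ≤ i + 1 := by
      by_contra hc
      have := List.drop_eq_nil_iff.mp h
      omega
    have : i = ps.length - 1 := by omega
    subst this
    rfl
  | cons r rest' ih =>
    intro i h hi
    have hmn : mnI ps (i+1) = r.headD 0 := by unfold mnI; rw [h]; rfl
    have hmx : mxI ps (i+1) = r.getLastD 0 := by unfold mxI; rw [h]; rfl
    have hdrop : ps.drop (i+2) = rest' := by
      have : ps.drop (i+2) = (ps.drop (i+1)).drop 1 := by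
        rw [List.drop_drop]
      rw [this, h]; rfl
    have hlt : i + 1 < ps.length := by
      have hlen := congrArg List.length h
      simp [List.length_drop] at hlen
      omega
    have := ih (i+1) hdrop hlt
    rw [show loopB (subA ps i 0) (subA ps i 1) (mnI ps i) (mxI ps i) (r :: rest')
          = loopB (subA ps (i+1) 0) (subA ps (i+1) 1) (mnI ps (i+1)) (mxI ps (i+1)) rest' by
        simp only [loopB, subA, hmn, hmx]
        simp]
    exact this

-- ===== VERDICT (by name: the statement is the Claim_ definition above) =====
theorem solution_spec : Claim_equal_solution := by
  intro products _ hpre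
  unfold Spec_solution solution solution_alt
  set ps := products.map (fun l => PySem.List.sorted l (fun x => x) false) with hps
  have hlen : ps.length = products.length := by simp [hps]
  have hpos : 0 < ps.length := by
    rw [hlen]
    cases products with
    | nil => exact absurd rfl hpre.1
    | cons _ _ => simp
  have h0 : (ps.headD []).headD 0 = mnI ps 0 := rfl
  have h1 : (ps.headD []).getLastD 0 = mxI ps 0 := rfl
  show min (subA ps (products.length - 1) 0) (subA ps (products.length - 1) 1)
      = loopB ((ps.headD []).getLastD 0 + |(ps.headD []).getLastD 0 - (ps.headD []).headD 0|)
              ((ps.headD []).getLastD 0) ((ps.headD []).headD 0) ((ps.headD []).getLastD 0) (ps.drop 1)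
  have hbase0 : (ps.headD []).getLastD 0 + |(ps.headD []).getLastD 0 - (ps.headD []).headD 0|
      = subA ps 0 0 := by simp [subA, mnI, mxI]
  have hbase1 : (ps.headD []).getLastD 0 = subA ps 0 1 := by simp [subA, mxI]
  rw [hbase0, h0, h1, hlen.symm]
  have hinv := loopB_inv ps (ps.drop 1) 0 rfl hpos
  rw [show subA ps 0 1 = mxI ps 0 by simp [subA, mxI]] at hinv
  exact hinv.symm
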